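-- pv_equiv track=rewrite | github.com/thekaiz3n/tk-algorithms | interview_training/cracking_the_coding_interview/string/001.01.py | all_unique_characters
-- ===== SOURCE A (Python) =====
-- def all_unique_characters(string):
--     characters_counter = {}
--
--     for char in string:
--         if char in characters_counter:
--             characters_counter[char] += 1
--         else:
--             characters_counter[char] = 1
--
--     for char, counter in characters_counter.items():
--         if counter > 1:
--             return False
--
--     return True
-- ===== SOURCE B (Python) =====
-- def all_unique_characters(string):
--     return len(set(string)) == len(string)
-- ===== Notes on version B (the rewrite author's own statement) =====
-- stated objective: idiomatic
-- what changed: Replaces the character-counting dict loop plus the separate scan over its items with a single cardinality comparison: len(set(string)) == len(string).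
import Mathlib
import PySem

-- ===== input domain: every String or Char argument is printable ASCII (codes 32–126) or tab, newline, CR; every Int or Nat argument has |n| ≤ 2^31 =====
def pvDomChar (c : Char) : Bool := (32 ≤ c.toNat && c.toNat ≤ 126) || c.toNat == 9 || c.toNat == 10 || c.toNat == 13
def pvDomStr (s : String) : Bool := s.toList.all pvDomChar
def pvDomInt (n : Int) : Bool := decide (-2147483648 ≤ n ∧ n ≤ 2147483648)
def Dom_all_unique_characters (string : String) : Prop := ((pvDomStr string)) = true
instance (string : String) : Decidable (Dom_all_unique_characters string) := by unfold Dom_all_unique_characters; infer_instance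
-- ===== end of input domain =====

-- B replaces A's counting-dict loop plus items scan with a single cardinality comparison len(set(s)) == len(s); same return value on every input.

-- ===== PORT A =====
-- first loop: build the character counter dict
def auc_count (string : String) : PySem.Dict Char Int :=
  string.toList.foldl
    (fun d c => if d.contains c then d.modify c 0 (· + 1) else d.insert c 1)
    PySem.Dict.empty

-- second loop: 'for char, counter in items: if counter > 1: return False' then 'return True'
def auc_scan : List (Char × Int) → Bool
  | [] => true
  | (_, n) :: rest => if n > 1 then false else auc_scan rest

def all_unique_characters (string : String) : Bool :=
  auc_scan (auc_count string).items

-- ===== PORT B =====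
def all_unique_characters_alt (string : String) : Bool :=
  PySem.Set.len (PySem.Set.ofList string.toList) == PySem.Str.len string

-- ===== PRECONDITION & SPEC =====
def Spec_all_unique_characters (string : String) (out : Bool) : Prop := out = all_unique_characters_alt string
instance (string : String) (out : Bool) : Decidable (Spec_all_unique_characters string out) := by unfold Spec_all_unique_characters; infer_instance

-- ===== CLAIM (what is proved, stated in full; the proofs are below) =====
def Claim_equal_all_unique_characters : Prop := ∀ (string : String), Dom_all_unique_characters string → Spec_all_unique_characters string (all_unique_characters string)

-- ===== LEMMAS AND PROOFS =====

-- A's insert-or-increment step is exactly Counter's modify step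
theorem auc_step_eq (d : PySem.Dict Char Int) (c : Char) :
    (if d.contains c then d.modify c 0 (· + 1) else d.insert c 1) = d.modify c 0 (· + 1) := by
  split_ifs with h
  · rfl
  · have h0 : d.getD c 0 = 0 :=
      PySem.Dict.getD_of_not_contains d 0 (by simpa using h)
    simp [PySem.Dict.modify, h0]

theorem auc_count_eq_counter (s : String) : auc_count s = PySem.Dict.counter s.toList := by
  unfold auc_count
  rw [PySem.Dict.counter_eq_foldl]
  congr 1
  funext d c
  exact auc_step_eq d c

theorem auc_scan_eq_all (l : List (Char × Int)) :
    auc_scan l = l.all (fun p => !decide (p.2 > 1)) := by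
  induction l with
  | nil => rfl
  | cons p rest ih =>
      obtain ⟨k, n⟩ := p
      by_cases h : n > 1 <;> simp [auc_scan, h, ih]

-- cardinality of the deduplicated list equals the length iff the list has no duplicates
theorem ofList_length_eq_iff (xs : List Char) :
    (PySem.Set.ofList xs).length = xs.length ↔ xs.Nodup := by
  constructor
  · intro h
    induction xs with
    | nil => simp
    | cons x rest ih =>
        rw [PySem.Set.ofList_cons] at h
        by_cases hx : x ∈ PySem.Set.ofList rest
        · exfalso
          unfold PySem.Set.discard at h
          have hlt : (List.filter (fun y => !y == x) (PySem.Set.ofList rest)).length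
              < (PySem.Set.ofList rest).length := by
            apply List.length_filter_lt_length_iff_exists.mpr
            exact ⟨x, hx, by simp⟩
          have hle := PySem.Set.length_ofList_le (α := Char) rest
          simp only [List.length_cons] at h
          omega
        · have hfeq : List.filter (fun y => !y == x) (PySem.Set.ofList rest)
              = PySem.Set.ofList rest := by
            apply List.filter_eq_self.mpr
            intro a ha
            simp only [Bool.not_eq_eq_eq_not, Bool.not_true, beq_eq_false_iff_ne]
            intro hax; exact hx (hax ▸ ha)
          unfold PySem.Set.discard at h
          rw [hfeq] at h
          simp only [List.length_cons] at h
          have hrest := ih (by omega)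
          have hxr : x ∉ rest := fun hm => hx ((PySem.Set.mem_ofList _ _).mpr hm)
          exact List.nodup_cons.mpr ⟨hxr, hrest⟩
  · intro h
    rw [PySem.Set.ofList_eq_self_of_nodup _ h]

-- A's value characterised: true iff the character list has no duplicates
theorem auc_eq_nodup (s : String) :
    all_unique_characters s = decide s.toList.Nodup := by
  unfold all_unique_characters
  rw [auc_count_eq_counter, auc_scan_eq_all, PySem.Dict.items_counter]
  rw [List.all_map]
  simp only [Function.comp_def]
  by_cases hnd : s.toList.Nodup
  · rw [decide_eq_true hnd]
    apply List.all_eq_true.mpr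
    intro k _
    have := List.nodup_iff_count_le_one.mp hnd k
    simp only [Bool.not_eq_eq_eq_not, Bool.not_true, decide_eq_false_iff_not, not_lt]
    exact_mod_cast this
  · rw [decide_eq_false hnd]
    rw [List.nodup_iff_count_le_one] at hnd
    push Not at hnd
    obtain ⟨a, ha⟩ := hnd
    have hmem : a ∈ s.toList := by
      by_contra hm
      rw [List.count_eq_zero_of_not_mem hm] at ha
      omega
    apply List.all_eq_false.mpr
    refine ⟨a, (PySem.Set.mem_ofList _ _).mpr hmem, ?_⟩
    have hlt : ((1 : Int) < (List.count a s.toList : Int)) := by exact_mod_cast ha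
    simp [hlt]

theorem alt_eq_nodup (s : String) :
    all_unique_characters_alt s = decide s.toList.Nodup := by
  unfold all_unique_characters_alt
  have hiff := ofList_length_eq_iff s.toList
  by_cases hnd : s.toList.Nodup
  · rw [decide_eq_true hnd]
    have := hiff.mpr hnd
    simp [PySem.Set.len, PySem.Str.len, this]
  · rw [decide_eq_false hnd]
    have hne : (PySem.Set.ofList s.toList).length ≠ s.toList.length := fun h => hnd (hiff.mp h)
    simp only [PySem.Set.len, PySem.Str.len, beq_eq_false_iff_ne, ne_eq]
    intro h
    exact hne (by exact_mod_cast h)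

-- ===== VERDICT (by name: the statement is the Claim_ definition above) =====
theorem all_unique_characters_spec : Claim_equal_all_unique_characters := by
  intro s _
  unfold Spec_all_unique_characters
  rw [auc_eq_nodup, alt_eq_nodup]
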